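-- pv_equiv track=rewrite | github.com/auditoriumus/python | exercise18.py | nearest_chapter
-- ===== SOURCE A (Python) =====
-- def nearest_chapter(list: list, page: int):
--     chapter = ''
--     for key in list:
--         if chapter == '':
--             chapter = key
--         else:
--             if abs(list[chapter] - page) > (abs(list[key] - page)):
--                 chapter = key
--             elif abs(list[chapter] - page) == (abs(list[key] - page)):
--                 if list[chapter] < list[key]:
--                     chapter = key
--
--     return chapter
-- ===== SOURCE B (Python) =====
-- def nearest_chapter(list: list, page: int):
--     if not list:
--         return ''
--     return sorted(list, key=lambda k: (abs(list[k] - page), -list[k]))[0]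
-- ===== Notes on version B (the rewrite author's own statement) =====
-- stated objective: alternative
-- what changed: Replaces A's sentinel-based single min-scan with guard-the-empty-case then stable-sort the keys by the composite key (abs(value-page), -value) and return the front, relying on sort stability for the first-occurrence tie-break.
-- intended difference: On dicts whose '' entry strictly precedes every earlier entry under the sort key, is not preceded by any later entry, and is not the last entry, A returns the best key among the entries after '' while B returns '': A's '' sentinel conflates the key '' with its unset state so the next entry always replaces it, and B's nearest key is the intended value. — e.g. on nearest_chapter([("", 1), ("x", 5)], 1): A returns "x", B returns ""
import Mathlib
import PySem

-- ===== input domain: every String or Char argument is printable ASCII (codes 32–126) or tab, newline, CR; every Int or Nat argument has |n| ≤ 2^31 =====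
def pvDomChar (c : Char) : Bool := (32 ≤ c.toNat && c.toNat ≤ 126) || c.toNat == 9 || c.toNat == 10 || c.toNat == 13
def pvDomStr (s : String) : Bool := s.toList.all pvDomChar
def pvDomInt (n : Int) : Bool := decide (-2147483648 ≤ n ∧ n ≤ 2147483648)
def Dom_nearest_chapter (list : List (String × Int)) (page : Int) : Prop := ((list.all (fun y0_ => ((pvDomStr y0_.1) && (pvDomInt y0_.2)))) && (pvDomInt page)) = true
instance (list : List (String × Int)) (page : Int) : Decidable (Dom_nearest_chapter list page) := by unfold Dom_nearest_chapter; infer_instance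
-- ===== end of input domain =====

-- B re-implements A's sentinel-based min-scan as sort-then-pick-front (same tie-breaks via
-- sort stability; no speed claim). The dict argument is modelled as its association list;
-- 'list[k]' is first-match lookup, exact for any image of a Python dict (distinct keys,
-- every looked-up key present, so the default 0 is never reached).
def pvLookup (l : List (String × Int)) (k : String) : Int :=
  (((l.find? (fun p => p.1 == k)).map Prod.snd).getD 0)

-- ===== PORT A =====
def nearest_chapter (list : List (String × Int)) (page : Int) : String :=
  list.foldl (fun chapter kv =>
    let key := kv.1
    if chapter = "" then key
    else
      if |pvLookup list chapter - page| > |pvLookup list key - page| then key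
      else if |pvLookup list chapter - page| = |pvLookup list key - page| then
        (if pvLookup list chapter < pvLookup list key then key else chapter)
      else chapter) ""

-- ===== PORT B =====
def nearest_chapter_alt (list : List (String × Int)) (page : Int) : String :=
  if list = [] then ""
  else
    (PySem.List.sorted2 (list.map Prod.fst)
      (fun k => |pvLookup list k - page|) (fun k => -(pvLookup list k))).headD ""

-- ===== PRECONDITION & SPEC =====
-- Pre_ excludes association lists with duplicate keys, which are not the image of any
-- Python dict (the argument is a dict; converting such a list to a dict collapses entries).
def Pre_nearest_chapter (list : List (String × Int)) (page : Int) : Prop :=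
  (list.map Prod.fst).Nodup
instance (list : List (String × Int)) (page : Int) : Decidable (Pre_nearest_chapter list page) := by
  unfold Pre_nearest_chapter; infer_instance

def pvWitness_nearest_chapter : (List (String × Int)) × Int := ([("a", 3), ("b", 7)], 5)

-- "the entry p strictly precedes q under B's composite sort key (nearer to page, then larger value)"
def pvLtKey (g : Int) (p q : String × Int) : Bool :=
  decide (|p.2 - g| < |q.2 - g|) ||
    (!decide (|q.2 - g| < |p.2 - g|) && decide (-(p.2) < -(q.2)))

-- On dicts whose '' entry strictly precedes every earlier entry under the sort key, is not
-- preceded by any later entry, and has at least one later entry, A returns the best of the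
-- entries after '' while B returns '': A's '' sentinel conflates the key '' with the unset
-- state, so the entry following it always replaces it; B's value is the intended nearest key.
def D_nearest_chapter (list : List (String × Int)) (page : Int) : Prop :=
  list.dropWhile (fun p => p.1 != "") ≠ [] ∧
  (list.dropWhile (fun p => p.1 != "")).tail ≠ [] ∧
  (∀ p ∈ list.takeWhile (fun p => p.1 != ""),
    pvLtKey page ((list.dropWhile (fun p => p.1 != "")).headD ("", 0)) p = true) ∧
  (∀ q ∈ (list.dropWhile (fun p => p.1 != "")).tail,
    pvLtKey page q ((list.dropWhile (fun p => p.1 != "")).headD ("", 0)) = false)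
instance (list : List (String × Int)) (page : Int) : Decidable (D_nearest_chapter list page) := by
  unfold D_nearest_chapter; infer_instance

def Spec_nearest_chapter (list : List (String × Int)) (page : Int) (out : String) : Prop := ¬ D_nearest_chapter list page → out = nearest_chapter_alt list page
instance (list : List (String × Int)) (page : Int) (out : String) : Decidable (Spec_nearest_chapter list page out) := by unfold Spec_nearest_chapter; infer_instance

def pvDiffWitness_nearest_chapter : (List (String × Int)) × Int := ([("", 1), ("x", 5)], 1)
def pvDiffWitnessOut_nearest_chapter : String × String := ("x", "")

-- ===== CLAIM (what is proved, stated in full; the proofs are below) =====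
def Claim_unchanged_nearest_chapter : Prop := ∀ (list : List (String × Int)) (page : Int), Dom_nearest_chapter list page → Pre_nearest_chapter list page → Spec_nearest_chapter list page (nearest_chapter list page)
def Claim_changed_nearest_chapter : Prop := Dom_nearest_chapter (pvDiffWitness_nearest_chapter.1) (pvDiffWitness_nearest_chapter.2) ∧ Pre_nearest_chapter (pvDiffWitness_nearest_chapter.1) (pvDiffWitness_nearest_chapter.2) ∧ D_nearest_chapter (pvDiffWitness_nearest_chapter.1) (pvDiffWitness_nearest_chapter.2) ∧ nearest_chapter (pvDiffWitness_nearest_chapter.1) (pvDiffWitness_nearest_chapter.2) = pvDiffWitnessOut_nearest_chapter.1 ∧ nearest_chapter_alt (pvDiffWitness_nearest_chapter.1) (pvDiffWitness_nearest_chapter.2) = pvDiffWitnessOut_nearest_chapter.2 ∧ pvDiffWitnessOut_nearest_chapter.1 ≠ pvDiffWitnessOut_nearest_chapter.2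
def Claim_exact_nearest_chapter : Prop := ∀ (list : List (String × Int)) (page : Int), Dom_nearest_chapter list page → Pre_nearest_chapter list page → D_nearest_chapter list page → nearest_chapter list page ≠ nearest_chapter_alt list page

-- ===== LEMMAS AND PROOFS =====

def pvBefore (list : List (String × Int)) (page : Int) (a b : String) : Bool :=
  decide (|pvLookup list a - page| < |pvLookup list b - page|) ||
    (!decide (|pvLookup list b - page| < |pvLookup list a - page|) &&
      decide (-(pvLookup list a) < -(pvLookup list b)))

-- order facts
theorem pvB_O1 (l : List (String × Int)) (g : Int) {x b k : String}
    (h1 : pvBefore l g x b = true) (h2 : pvBefore l g k b = false) : pvBefore l g x k = true := by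
  simp only [pvBefore, Bool.or_eq_true, Bool.and_eq_true, Bool.not_eq_true',
    decide_eq_true_eq, decide_eq_false_iff_not, Bool.or_eq_false_iff, Bool.and_eq_false_iff,
    Bool.not_eq_false', Bool.not_eq_true, decide_eq_false_iff_not, decide_eq_true_eq] at *
  rcases h1 with h | ⟨h, h'⟩ <;> rcases h2 with ⟨h2a, h2b⟩ <;> omega

theorem pvB_T (l : List (String × Int)) (g : Int) {a b c : String}
    (h1 : pvBefore l g a b = true) (h2 : pvBefore l g b c = true) : pvBefore l g a c = true := by
  simp only [pvBefore, Bool.or_eq_true, Bool.and_eq_true, Bool.not_eq_true',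
    decide_eq_true_eq, decide_eq_false_iff_not] at *
  rcases h1 with h | ⟨h, h'⟩ <;> rcases h2 with h2 | ⟨h2, h2'⟩ <;> [left; left; left; right] <;> omega

def pvSel (l : List (String × Int)) (g : Int) (c : String) (ks : List String) : String :=
  ks.foldl (fun c k => if pvBefore l g k c then k else c) c

theorem pvB_irrefl (l : List (String × Int)) (g : Int) (x : String) : pvBefore l g x x = false := by
  simp [pvBefore]

theorem pvSel_cons (l : List (String × Int)) (g : Int) (c k : String) (t : List String) :
    pvSel l g c (k :: t) = pvSel l g (if pvBefore l g k c then k else c) t := rfl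

theorem pvSel_mem (l : List (String × Int)) (g : Int) :
    ∀ (ks : List String) (c : String), pvSel l g c ks ∈ c :: ks := by
  intro ks
  induction ks with
  | nil => intro c; simp [pvSel]
  | cons k t ih =>
    intro c
    rw [pvSel_cons]
    rcases List.mem_cons.mp (ih (if pvBefore l g k c then k else c)) with h | h
    · rw [h]; split <;> simp
    · simp [h]

theorem pvSel_min (l : List (String × Int)) (g : Int) :
    ∀ (ks : List String) (c : String), ∀ x ∈ c :: ks, pvBefore l g x (pvSel l g c ks) = false := by
  intro ks
  induction ks with
  | nil =>
    intro c x hx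
    simp only [List.mem_cons, List.not_mem_nil, or_false] at hx
    subst hx
    simpa [pvSel] using pvB_irrefl l g x
  | cons k t ih =>
    intro c x hx
    rw [pvSel_cons]
    by_cases hkc : pvBefore l g k c = true
    · rw [if_pos hkc]
      rcases List.mem_cons.mp hx with heq | hx'
      · subst heq
        cases hcr : pvBefore l g x (pvSel l g k t) with
        | false => rfl
        | true =>
          have hkm := ih k k (List.mem_cons_self ..)
          exact absurd (pvB_T l g hkc hcr) (by rw [hkm]; simp)
      · exact ih k x hx'
    · rw [if_neg hkc]
      rcases List.mem_cons.mp hx with heq | hx'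
      · subst heq
        exact ih _ _ (List.mem_cons_self ..)
      · rcases List.mem_cons.mp hx' with heq | hx''
        · subst heq
          cases hkr : pvBefore l g x (pvSel l g c t) with
          | false => rfl
          | true =>
            have hcm := ih c c (List.mem_cons_self ..)
            exact absurd (pvB_O1 l g hkr hcm) (by simpa using hkc)
        · exact ih c x (List.mem_cons_of_mem _ hx'')

theorem pvSel_stay (l : List (String × Int)) (g : Int) :
    ∀ (ks : List String) (c : String), (∀ x ∈ ks, pvBefore l g x c = false) → pvSel l g c ks = c := by
  intro ks
  induction ks with
  | nil => intro c _; rfl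
  | cons k t ih =>
    intro c h
    rw [pvSel_cons, h k (List.mem_cons_self ..)]
    exact ih c (fun x hx => h x (List.mem_cons_of_mem _ hx))

theorem pvSel_seed_irrel (l : List (String × Int)) (g : Int) :
    ∀ (ks : List String) (c c' : String), (∃ x ∈ ks, pvBefore l g x c = true ∧ pvBefore l g x c' = true) →
      pvSel l g c ks = pvSel l g c' ks := by
  intro ks
  induction ks with
  | nil => rintro c c' ⟨x, hx, _⟩; simp at hx
  | cons k t ih =>
    rintro c c' ⟨x, hx, hxc, hxc'⟩
    rw [pvSel_cons, pvSel_cons]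
    by_cases h1 : pvBefore l g k c = true <;> by_cases h2 : pvBefore l g k c' = true
    · rw [if_pos h1, if_pos h2]
    · rw [if_pos h1, if_neg h2]
      have hxk : x ∈ t := by
        rcases List.mem_cons.mp hx with rfl | h
        · exact absurd hxc' h2
        · exact h
      exact ih k c' ⟨x, hxk, pvB_O1 l g hxc' (by simpa using h2), hxc'⟩
    · rw [if_neg h1, if_pos h2]
      have hxk : x ∈ t := by
        rcases List.mem_cons.mp hx with rfl | h
        · exact absurd hxc h1
        · exact h
      exact ih c k ⟨x, hxk, hxc, pvB_O1 l g hxc (by simpa using h1)⟩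
    · have hxk : x ∈ t := by
        rcases List.mem_cons.mp hx with rfl | h
        · exact absurd hxc h1
        · exact h
      rw [if_neg h1, if_neg h2]
      exact ih c c' ⟨x, hxk, hxc, hxc'⟩

def pvStepA (l : List (String × Int)) (g : Int) (chapter key : String) : String :=
  if chapter = "" then key
  else if |pvLookup l chapter - g| > |pvLookup l key - g| then key
  else if |pvLookup l chapter - g| = |pvLookup l key - g| then
    (if pvLookup l chapter < pvLookup l key then key else chapter)
  else chapter

def pvFoldA (l : List (String × Int)) (g : Int) (c : String) (ks : List String) : String :=
  ks.foldl (pvStepA l g) c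

theorem pvStepA_eq (l : List (String × Int)) (g : Int) (c k : String) (hc : c ≠ "") :
    pvStepA l g c k = if pvBefore l g k c then k else c := by
  rw [pvStepA, if_neg hc]
  simp only [pvBefore, Bool.or_eq_true, Bool.and_eq_true, Bool.not_eq_true',
    decide_eq_true_eq, decide_eq_false_iff_not]
  split_ifs with h1 h2 h3 h4 h5 h6 h7 <;> first | rfl | (exfalso; omega)

theorem pvFoldA_cons (l : List (String × Int)) (g : Int) (c k : String) (t : List String) :
    pvFoldA l g c (k :: t) = pvFoldA l g (pvStepA l g c k) t := rfl

theorem pvFoldA_eq_sel (l : List (String × Int)) (g : Int) :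
    ∀ (ks : List String) (c : String), c ≠ "" → (∀ k ∈ ks, k ≠ "") →
      pvFoldA l g c ks = pvSel l g c ks := by
  intro ks
  induction ks with
  | nil => intro c _ _; rfl
  | cons k t ih =>
    intro c hc hall
    rw [pvFoldA_cons, pvSel_cons, pvStepA_eq l g c k hc]
    have hc' : (if pvBefore l g k c then k else c) ≠ "" := by
      split
      · exact hall k (List.mem_cons_self ..)
      · exact hc
    exact ih _ hc' (fun x hx => hall x (List.mem_cons_of_mem _ hx))

theorem pvSel_ne_empty (l : List (String × Int)) (g : Int) (ks : List String) (c : String)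
    (hc : c ≠ "") (hall : ∀ k ∈ ks, k ≠ "") : pvSel l g c ks ≠ "" := by
  rcases List.mem_cons.mp (pvSel_mem l g ks c) with h | h
  · rw [h]; exact hc
  · exact hall _ h

-- B's value: head-select over the whole key list
def pvRunB (l : List (String × Int)) (g : Int) (ks : List String) : String :=
  match ks with | [] => "" | k :: t => pvSel l g k t

-- value of A's loop run from scratch on an ''-free list
theorem pvFoldA_free (l : List (String × Int)) (g : Int) (S : List String)
    (hS : ∀ k ∈ S, k ≠ "") :
    pvFoldA l g "" S = pvRunB l g S := by
  cases S with
  | nil => rfl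
  | cons s S' =>
    rw [pvFoldA_cons]
    have : pvStepA l g "" s = s := by rw [pvStepA, if_pos rfl]
    rw [this]
    exact pvFoldA_eq_sel l g S' s (hS s (List.mem_cons_self ..))
      (fun x hx => hS x (List.mem_cons_of_mem _ hx))

-- the change region, phrased on the key list split P ++ "" :: S
def pvDKS (l : List (String × Int)) (g : Int) (P S : List String) : Prop :=
  S ≠ [] ∧ (∀ k ∈ P, pvBefore l g "" k = true) ∧ (∀ x ∈ S, pvBefore l g x "" = false)

theorem pvFoldA_append (l : List (String × Int)) (g : Int) (c : String) (t₁ t₂ : List String) :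
    pvFoldA l g c (t₁ ++ t₂) = pvFoldA l g (pvFoldA l g c t₁) t₂ := List.foldl_append ..

theorem pvSel_append (l : List (String × Int)) (g : Int) (c : String) (t₁ t₂ : List String) :
    pvSel l g c (t₁ ++ t₂) = pvSel l g (pvSel l g c t₁) t₂ := List.foldl_append ..

theorem pvStepA_empty (l : List (String × Int)) (g : Int) (k : String) :
    pvStepA l g "" k = k := by rw [pvStepA, if_pos rfl]

-- A's restarted run and B's continued run agree on the ''-free tail unless nothing there beats ''
theorem pvFree_eq (l : List (String × Int)) (g : Int) (S : List String)
    (hS : ∀ k ∈ S, k ≠ "")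
    (h : S = [] ∨ ∃ x ∈ S, pvBefore l g x "" = true) :
    pvFoldA l g "" S = pvSel l g "" S := by
  cases S with
  | nil => rfl
  | cons s S' =>
    rw [pvFoldA_cons, pvStepA_empty, pvSel_cons,
      pvFoldA_eq_sel l g S' s (hS s (List.mem_cons_self ..))
        (fun x hx => hS x (List.mem_cons_of_mem _ hx))]
    rcases h with h | ⟨x, hx, hxe⟩
    · exact absurd h (by simp)
    · by_cases hs : pvBefore l g s "" = true
      · rw [if_pos hs]
      · rw [if_neg hs]
        have hxS' : x ∈ S' := by
          rcases List.mem_cons.mp hx with rfl | h'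
          · exact absurd hxe hs
          · exact h'
        exact pvSel_seed_irrel l g S' s ""
          ⟨x, hxS', pvB_O1 l g hxe (by simpa using hs), hxe⟩

theorem pvEq_split (l : List (String × Int)) (g : Int) (P S : List String)
    (hP : ∀ k ∈ P, k ≠ "") (hS : ∀ k ∈ S, k ≠ "") (hnD : ¬ pvDKS l g P S) :
    pvFoldA l g "" (P ++ "" :: S) = pvRunB l g (P ++ "" :: S) := by
  cases P with
  | nil =>
    simp only [List.nil_append, pvRunB, pvFoldA_cons, pvStepA_empty]
    refine pvFree_eq l g S hS ?_
    by_cases hSnil : S = []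
    · exact Or.inl hSnil
    · right
      by_contra hno
      push_neg at hno
      exact hnD ⟨hSnil, fun k hk => absurd hk (List.not_mem_nil), fun x hx => by
        cases h : pvBefore l g x "" with
        | false => rfl
        | true => exact absurd h (hno x hx)⟩
  | cons p P' =>
    have hp : p ≠ "" := hP p (List.mem_cons_self ..)
    have hP' : ∀ k ∈ P', k ≠ "" := fun k hk => hP k (List.mem_cons_of_mem _ hk)
    have hc : pvSel l g p P' ≠ "" := pvSel_ne_empty l g P' p hp hP'
    rw [List.cons_append, pvFoldA_cons, pvStepA_empty, pvFoldA_append,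
      pvFoldA_eq_sel l g P' p hp hP']
    set c := pvSel l g p P' with hcdef
    rw [pvFoldA_cons, pvStepA_eq l g c "" hc]
    have hB : pvRunB l g (p :: (P' ++ "" :: S))
        = pvSel l g (if pvBefore l g "" c then "" else c) S := by
      rw [pvRunB, pvSel_append, ← hcdef, pvSel_cons]
    rw [hB]
    by_cases hb : pvBefore l g "" c = true
    · rw [if_pos hb]
      refine pvFree_eq l g S hS ?_
      by_cases hSnil : S = []
      · exact Or.inl hSnil
      · right
        by_contra hno
        push_neg at hno
        refine hnD ⟨hSnil, fun k hk => ?_, fun x hx => by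
          cases h : pvBefore l g x "" with
          | false => rfl
          | true => exact absurd h (hno x hx)⟩
        exact pvB_O1 l g hb (pvSel_min l g P' p k hk)
    · rw [if_neg hb]
      exact pvFoldA_eq_sel l g S c hc hS

theorem pvNe_split (l : List (String × Int)) (g : Int) (P S : List String)
    (hP : ∀ k ∈ P, k ≠ "") (hS : ∀ k ∈ S, k ≠ "") (hD : pvDKS l g P S) :
    pvRunB l g (P ++ "" :: S) = "" ∧ pvFoldA l g "" (P ++ "" :: S) ≠ "" := by
  obtain ⟨hSnil, hPbeat, hSlose⟩ := hD
  have hBstay : pvSel l g "" S = "" := pvSel_stay l g S "" hSlose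
  have hAfree : pvFoldA l g "" S ≠ "" := by
    cases S with
    | nil => exact absurd rfl hSnil
    | cons s S' =>
      rw [pvFoldA_free l g (s :: S') hS]
      exact pvSel_ne_empty l g S' s (hS s (List.mem_cons_self ..))
        (fun x hx => hS x (List.mem_cons_of_mem _ hx))
  cases P with
  | nil =>
    simp only [List.nil_append, pvRunB, pvFoldA_cons, pvStepA_empty]
    exact ⟨hBstay, hAfree⟩
  | cons p P' =>
    have hp : p ≠ "" := hP p (List.mem_cons_self ..)
    have hP' : ∀ k ∈ P', k ≠ "" := fun k hk => hP k (List.mem_cons_of_mem _ hk)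
    have hc : pvSel l g p P' ≠ "" := pvSel_ne_empty l g P' p hp hP'
    have hb : pvBefore l g "" (pvSel l g p P') = true := by
      rcases List.mem_cons.mp (pvSel_mem l g P' p) with h | h
      · rw [h]; exact hPbeat p (List.mem_cons_self ..)
      · exact hPbeat _ (List.mem_cons_of_mem _ h)
    constructor
    · simp only [List.cons_append, pvRunB]
      rw [pvSel_append, pvSel_cons, if_pos hb, hBstay]
    · rw [List.cons_append, pvFoldA_cons, pvStepA_empty, pvFoldA_append,
        pvFoldA_eq_sel l g P' p hp hP', pvFoldA_cons, pvStepA_eq l g _ "" hc, if_pos hb]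
      exact hAfree

theorem pvLookup_eq (l : List (String × Int)) (hnd : (l.map Prod.fst).Nodup) :
    ∀ p ∈ l, pvLookup l p.1 = p.2 := by
  induction l with
  | nil => intro p hp; simp at hp
  | cons q t ih =>
    intro p hp
    simp only [List.map_cons, List.nodup_cons] at hnd
    rcases List.mem_cons.mp hp with rfl | hp'
    · simp [pvLookup]
    · by_cases hq : q.1 = p.1
      · exact absurd (hq ▸ List.mem_map_of_mem (f := Prod.fst) hp') hnd.1
      · have : pvLookup (q :: t) p.1 = pvLookup t p.1 := by
          have hfq : ¬ ((fun p_1 : String × Int => p_1.1 == p.1) q = true) := by simpa using hq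
          unfold pvLookup
          rw [List.find?_cons_of_neg (p := fun p_1 : String × Int => p_1.1 == p.1) hfq]
        rw [this]
        exact ih hnd.2 p hp'

theorem pvBefore_eq_ltKey (l : List (String × Int)) (g : Int)
    (hnd : (l.map Prod.fst).Nodup) (p q : String × Int) (hp : p ∈ l) (hq : q ∈ l) :
    pvBefore l g p.1 q.1 = pvLtKey g p q := by
  rw [pvBefore, pvLtKey, pvLookup_eq l hnd p hp, pvLookup_eq l hnd q hq]

theorem pvMain (l : List (String × Int)) (g : Int) (hnd : (l.map Prod.fst).Nodup) :
    (¬ D_nearest_chapter l g → pvFoldA l g "" (l.map Prod.fst) = pvRunB l g (l.map Prod.fst)) ∧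
    (D_nearest_chapter l g → pvRunB l g (l.map Prod.fst) = "" ∧ pvFoldA l g "" (l.map Prod.fst) ≠ "") := by
  by_cases hdw : l.dropWhile (fun p => p.1 != "") = []
  · -- no '' key anywhere
    have hfree : ∀ k ∈ l.map Prod.fst, k ≠ "" := by
      intro k hk
      rcases List.mem_map.mp hk with ⟨p, hp, rfl⟩
      have := (List.dropWhile_eq_nil_iff).mp hdw p hp
      simpa using this
    constructor
    · intro _
      exact pvFoldA_free l g _ hfree
    · intro hD
      exact absurd hdw hD.1
  · -- '' key present: split l = Pl ++ e :: Sl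
    obtain ⟨e, dtl, hd⟩ : ∃ e dtl, l.dropWhile (fun p => p.1 != "") = e :: dtl := by
      cases h : l.dropWhile (fun p => p.1 != "") with
      | nil => exact absurd h hdw
      | cons e dtl => exact ⟨e, dtl, rfl⟩
    have he1 : e.1 = "" := by
      have h := List.head_dropWhile_not (fun p : String × Int => p.1 != "") hdw
      have h2 : (l.dropWhile (fun p : String × Int => p.1 != "")).head hdw = e := by
        have h3 := congrArg (fun x => List.headD x ("", (0:Int))) hd
        simp only [List.headD_cons] at h3
        rw [← h3]
        simp [List.head?_eq_some_head hdw]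
      rw [h2] at h
      simpa using h
    have hsplit : l = l.takeWhile (fun p => p.1 != "") ++ e :: dtl := by
      rw [← hd, List.takeWhile_append_dropWhile]
    set Pl := l.takeWhile (fun p => p.1 != "") with hPl
    have hPmem : ∀ p ∈ Pl, p ∈ l := fun p hp => (List.takeWhile_sublist (fun p : String × Int => p.1 != "")).subset hp
    have hSmem : ∀ q ∈ dtl, q ∈ l := by
      intro q hq
      have : q ∈ l.dropWhile (fun p => p.1 != "") := by rw [hd]; exact List.mem_cons_of_mem _ hq
      exact (List.dropWhile_sublist (fun p : String × Int => p.1 != "")).subset this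
    have hemem : e ∈ l := by
      have : e ∈ l.dropWhile (fun p => p.1 != "") := by rw [hd]; exact List.mem_cons_self ..
      exact (List.dropWhile_sublist (fun p : String × Int => p.1 != "")).subset this
    have hPfree : ∀ k ∈ Pl.map Prod.fst, k ≠ "" := by
      intro k hk
      rcases List.mem_map.mp hk with ⟨p, hp, rfl⟩
      simpa using List.mem_takeWhile_imp hp
    have hks : l.map Prod.fst = Pl.map Prod.fst ++ "" :: dtl.map Prod.fst := by
      conv_lhs => rw [hsplit]
      rw [List.map_append, List.map_cons, he1]
    have hSfree : ∀ k ∈ dtl.map Prod.fst, k ≠ "" := by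
      have hnd' := hks ▸ hnd
      have h2 : ("" :: dtl.map Prod.fst).Nodup := (List.nodup_append.mp hnd').2.1
      intro k hk heq
      exact (List.nodup_cons.mp h2).1 (heq ▸ hk)
    -- bridge pvD ↔ pvDKS
    have hiff : D_nearest_chapter l g ↔ pvDKS l g (Pl.map Prod.fst) (dtl.map Prod.fst) := by
      rw [D_nearest_chapter, pvDKS, hd]
      simp only [← hPl, List.headD_cons, List.tail_cons, ne_eq, List.map_eq_nil_iff]
      constructor
      · rintro ⟨-, h2, h3, h4⟩
        refine ⟨h2, ?_, ?_⟩
        · intro k hk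
          rcases List.mem_map.mp hk with ⟨p, hp, rfl⟩
          have := pvBefore_eq_ltKey l g hnd e p hemem (hPmem p hp)
          rw [he1] at this
          rw [this]
          exact h3 p hp
        · intro x hx
          rcases List.mem_map.mp hx with ⟨q, hq, rfl⟩
          have := pvBefore_eq_ltKey l g hnd q e (hSmem q hq) hemem
          rw [he1] at this
          rw [this]
          exact h4 q hq
      · rintro ⟨h2, h3, h4⟩
        refine ⟨by simp, h2, ?_, ?_⟩
        · intro p hp
          have := pvBefore_eq_ltKey l g hnd e p hemem (hPmem p hp)
          rw [he1] at this
          rw [← this]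
          exact h3 p.1 (List.mem_map_of_mem hp)
        · intro q hq
          have := pvBefore_eq_ltKey l g hnd q e (hSmem q hq) hemem
          rw [he1] at this
          rw [← this]
          exact h4 q.1 (List.mem_map_of_mem hq)
    constructor
    · intro hnD
      rw [hks]
      exact pvEq_split l g _ _ hPfree hSfree (fun hD => hnD (hiff.mpr hD))
    · intro hD
      rw [hks]
      exact pvNe_split l g _ _ hPfree hSfree (hiff.mp hD)

-- port bridges: each port computes its string-level counterpart over the key list
theorem pvBridgeA (l : List (String × Int)) (g : Int) :
    nearest_chapter l g = pvFoldA l g "" (l.map Prod.fst) := by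
  rw [nearest_chapter, pvFoldA, List.foldl_map]
  rfl

theorem pv_head_insert_fold (before : String → String → Bool) :
    ∀ (ks : List String) (a : List String), a ≠ [] →
      (ks.foldl (fun acc x => PySem.List.insertBy before x acc) a).headD ""
        = ks.foldl (fun c k => if before k c then k else c) (a.headD "") := by
  intro ks
  induction ks with
  | nil => intro a _; rfl
  | cons k ks ih =>
    intro a ha
    cases a with
    | nil => exact absurd rfl ha
    | cons y ys =>
      simp only [List.foldl_cons]
      rw [ih (PySem.List.insertBy before k (y :: ys)) (by simp [PySem.List.insertBy]; split <;> simp)]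
      congr 1
      simp [PySem.List.insertBy]
      split <;> simp

theorem pvBridgeB (l : List (String × Int)) (g : Int) :
    nearest_chapter_alt l g = pvRunB l g (l.map Prod.fst) := by
  cases l with
  | nil => rfl
  | cons kv rest =>
    simp only [nearest_chapter_alt, if_neg (List.cons_ne_nil kv rest),
      PySem.List.sorted2, List.map_cons, List.foldl_cons]
    rw [show PySem.List.insertBy _ kv.1 ([] : List String) = [kv.1] from by
      simp [PySem.List.insertBy]]
    simp only [Bool.false_eq_true, if_false]
    rw [pv_head_insert_fold _ ((rest.map Prod.fst)) [kv.1] (by simp)]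
    rfl

-- ===== VERDICT (by name: the statement is the Claim_ definition above) =====
theorem nearest_chapter_spec : Claim_unchanged_nearest_chapter := by
  intro list page _ hpre hnD
  show nearest_chapter list page = nearest_chapter_alt list page
  rw [pvBridgeA, pvBridgeB]
  exact (pvMain list page hpre).1 hnD

theorem nearest_chapter_changed : Claim_changed_nearest_chapter := by
  unfold Claim_changed_nearest_chapter; decide

theorem nearest_chapter_tight : Claim_exact_nearest_chapter := by
  intro list page _ hpre hD
  rw [pvBridgeA, pvBridgeB]
  obtain ⟨hB, hA⟩ := (pvMain list page hpre).2 hD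
  rw [hB]
  exact hA
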